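-- pv_equiv track=rewrite | github.com/PMCC-BioinformaticsCore/janis-core | janis_core/translations/nfgen/utils.py | cast_keywords
-- ===== SOURCE A (Python) =====
-- def cast_keywords(val: str) -> str:
--     # this is done in string world - need a better way of handling lists!
--     keyword_map: dict[str, str] = {
--         'None': 'null',
--         'False': 'false',
--         'True': 'true',
--     }
--     for python_val, groovy_val in keyword_map.items():
--         if python_val in val:
--             val = val.replace(python_val, groovy_val)
--     return val
-- ===== SOURCE B (Python) =====
-- def cast_keywords(val: str) -> str:
--     # single left-to-right pass: at each position emit the Groovy replacement of
--     # whichever keyword starts there (keywords never overlap and replacements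
--     # contain no keywords, so one pass equals A's three sequential scans)
--     keyword_map: dict[str, str] = {
--         'None': 'null',
--         'False': 'false',
--         'True': 'true',
--     }
--     out = []
--     i = 0
--     n = len(val)
--     while i < n:
--         for python_val, groovy_val in keyword_map.items():
--             if val.startswith(python_val, i):
--                 out.append(groovy_val)
--                 i += len(python_val)
--                 break
--         else:
--             out.append(val[i])
--             i += 1
--     return ''.join(out)
-- ===== Notes on version B (the rewrite author's own statement) =====
-- stated objective: alternative
-- what changed: A does three sequential full-string replace passes (each guarded by an 'in' scan); B builds the output in a single left-to-right scan, matching any of the three keywords at each position and emitting its Groovy replacement (valid since keywords never overlap and replacements contain no keywords).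
import Mathlib
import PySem

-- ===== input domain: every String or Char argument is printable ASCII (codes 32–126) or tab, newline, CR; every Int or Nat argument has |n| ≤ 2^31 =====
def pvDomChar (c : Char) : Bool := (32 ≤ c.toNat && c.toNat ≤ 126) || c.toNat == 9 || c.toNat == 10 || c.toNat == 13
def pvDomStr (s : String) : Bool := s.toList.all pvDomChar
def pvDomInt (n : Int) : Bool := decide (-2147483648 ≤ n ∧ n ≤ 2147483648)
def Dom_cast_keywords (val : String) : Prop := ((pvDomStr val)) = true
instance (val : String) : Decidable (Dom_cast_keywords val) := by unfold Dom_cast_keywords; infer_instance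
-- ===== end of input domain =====

-- B replaces A's three guarded sequential `replace` passes by one left-to-right scan that
-- emits the Groovy replacement of whichever keyword starts at each position (alternative
-- decomposition, same O(n) cost).

-- ===== PORT A =====
def cast_keywords (val : String) : String :=
  -- for python_val, groovy_val in keyword_map.items(): if python_val in val: val = val.replace(python_val, groovy_val)
  let val1 := if PySem.Str.isIn "None" val then PySem.Str.replace val "None" "null" else val
  let val2 := if PySem.Str.isIn "False" val1 then PySem.Str.replace val1 "False" "false" else val1
  let val3 := if PySem.Str.isIn "True" val2 then PySem.Str.replace val2 "True" "true" else val2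
  val3

-- ===== PORT B =====
-- the while-loop of Source B: at each position try the keywords in dict order (val.startswith(kw, i)),
-- emit the Groovy value and skip the keyword, else copy the character
def castGo : List Char → List Char
  | [] => []
  | c :: t =>
    if List.isPrefixOf ['N','o','n','e'] (c :: t) then
      ['n','u','l','l'] ++ castGo (t.drop 3)
    else if List.isPrefixOf ['F','a','l','s','e'] (c :: t) then
      ['f','a','l','s','e'] ++ castGo (t.drop 4)
    else if List.isPrefixOf ['T','r','u','e'] (c :: t) then
      ['t','r','u','e'] ++ castGo (t.drop 3)
    else
      c :: castGo t
termination_by l => l.length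
decreasing_by all_goals (simp [List.length_drop]; try omega)

def cast_keywords_alt (val : String) : String := String.ofList (castGo val.toList)

-- ===== PRECONDITION & SPEC =====
def Spec_cast_keywords (val : String) (out : String) : Prop := out = cast_keywords_alt val
instance (val : String) (out : String) : Decidable (Spec_cast_keywords val out) := by unfold Spec_cast_keywords; infer_instance

-- ===== CLAIM (what is proved, stated in full; the proofs are below) =====
def Claim_equal_cast_keywords : Prop := ∀ (val : String), Dom_cast_keywords val → Spec_cast_keywords val (cast_keywords val)

-- ===== LEMMAS AND PROOFS =====

-- proof-side characterisation of Python's str.replace for a nonempty pattern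
def repKW (old new : List Char) : List Char → List Char
  | [] => []
  | c :: t =>
    if List.isPrefixOf old (c :: t) then new ++ repKW old new (t.drop (old.length - 1))
    else c :: repKW old new t
termination_by l => l.length
decreasing_by all_goals (simp [List.length_drop]; try omega)

theorem replace_go_eq (old new : List Char) (hold : old ≠ []) :
    ∀ (fuel : Nat) (l acc : List Char), l.length ≤ fuel →
      PySem.Chars.replace.go old new fuel l acc = acc.reverse ++ repKW old new l := by
  intro fuel
  induction fuel with
  | zero =>
      intro l acc hl
      have : l = [] := by cases l <;> simp_all
      subst this
      simp [PySem.Chars.replace.go, repKW]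
  | succ fuel ih =>
      intro l acc hl
      cases l with
      | nil => simp [PySem.Chars.replace.go, repKW]
      | cons c t =>
          obtain ⟨k, hk⟩ : ∃ k, old.length = k + 1 := by
            cases old with
            | nil => exact absurd rfl hold
            | cons a b => exact ⟨b.length, by simp⟩
          by_cases hpre : List.isPrefixOf old (c :: t) = true
          · rw [PySem.Chars.replace.go]
            simp only [hpre, if_true]
            have hdrop : List.drop old.length (c :: t) = t.drop (old.length - 1) := by
              rw [hk]; simp
            have hlen : (List.drop old.length (c :: t)).length ≤ fuel := by
              rw [List.length_drop]
              simp only [List.length_cons] at hl ⊢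
              omega
            rw [hdrop] at hlen ⊢
            rw [ih _ _ hlen, repKW]
            simp [hpre]
          · rw [PySem.Chars.replace.go]
            simp only [hpre, if_false, Bool.false_eq_true]
            have hlen : t.length ≤ fuel := by
              simp only [List.length_cons] at hl; omega
            rw [ih _ _ hlen, repKW]
            simp [hpre]

theorem replace_eq_repKW (old new l : List Char) (hold : old ≠ []) :
    PySem.Chars.replace l old new = repKW old new l := by
  rw [PySem.Chars.replace]
  have : old.isEmpty = false := by cases old <;> simp_all
  rw [this]
  simp only [Bool.false_eq_true, if_false]
  rw [replace_go_eq old new hold l.length l [] le_rfl]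
  simp

theorem repKW_of_not_infix (old new : List Char) :
    ∀ l, ¬ old <:+: l → repKW old new l = l := by
  intro l
  induction l using repKW.induct old with
  | case1 => rw [repKW]; intro _; rfl
  | case2 c t hpre ih =>
      intro hinf
      exact absurd ((List.isPrefixOf_iff_prefix.mp hpre).isInfix) hinf
  | case3 c t hpre ih =>
      intro hinf
      rw [repKW]
      simp only [hpre, if_false, Bool.false_eq_true]
      rw [ih (fun h => hinf (h.trans (List.suffix_cons c t).isInfix))]

-- a prefix avoiding the replacement's head char passes through repKW unchanged
theorem prefix_through_repKW (old new : List Char) (nh : Char) (hnew : new.head? = some nh) :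
    ∀ l p, nh ∉ p → List.isPrefixOf p (repKW old new l) = true → List.isPrefixOf p l = true := by
  intro l
  induction l using repKW.induct old with
  | case1 =>
      intro p _ hp
      rw [repKW] at hp
      exact hp
  | case2 c t hpre ih =>
      intro p hnp hp
      rw [repKW] at hp
      simp only [hpre, if_true] at hp
      cases p with
      | nil => simp
      | cons q p' =>
          obtain ⟨a, b, rfl⟩ : ∃ a b, new = a :: b := by
            cases new with
            | nil => simp at hnew
            | cons a b => exact ⟨a, b, rfl⟩
          simp only [List.head?_cons, Option.some.injEq] at hnew
          subst hnew
          simp only [List.cons_append, List.isPrefixOf, Bool.and_eq_true, beq_iff_eq] at hp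
          exact absurd (hp.1 ▸ List.mem_cons_self) hnp
  | case3 c t hpre ih =>
      intro p hnp hp
      rw [repKW] at hp
      simp only [hpre, if_false, Bool.false_eq_true] at hp
      cases p with
      | nil => simp
      | cons q p' =>
          simp only [List.isPrefixOf, Bool.and_eq_true] at hp ⊢
          exact ⟨hp.1, ih p' (fun h => hnp (List.mem_cons_of_mem _ h)) hp.2⟩

-- literal step lemmas: the keywords match / step through independently of the tail
theorem repN_match (X : List Char) :
    repKW ['N','o','n','e'] ['n','u','l','l'] ('N'::'o'::'n'::'e'::X)
      = 'n'::'u'::'l'::'l':: repKW ['N','o','n','e'] ['n','u','l','l'] X := by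
  rw [repKW]; simp [List.isPrefixOf]

theorem repF_match (X : List Char) :
    repKW ['F','a','l','s','e'] ['f','a','l','s','e'] ('F'::'a'::'l'::'s'::'e'::X)
      = 'f'::'a'::'l'::'s'::'e':: repKW ['F','a','l','s','e'] ['f','a','l','s','e'] X := by
  rw [repKW]; simp [List.isPrefixOf]

theorem repT_match (X : List Char) :
    repKW ['T','r','u','e'] ['t','r','u','e'] ('T'::'r'::'u'::'e'::X)
      = 't'::'r'::'u'::'e':: repKW ['T','r','u','e'] ['t','r','u','e'] X := by
  rw [repKW]; simp [List.isPrefixOf]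

theorem repF_null (X : List Char) :
    repKW ['F','a','l','s','e'] ['f','a','l','s','e'] ('n'::'u'::'l'::'l'::X)
      = 'n'::'u'::'l'::'l':: repKW ['F','a','l','s','e'] ['f','a','l','s','e'] X := by
  rw [repKW]; simp [List.isPrefixOf]
  rw [repKW]; simp [List.isPrefixOf]
  rw [repKW]; simp [List.isPrefixOf]
  rw [repKW]; simp [List.isPrefixOf]

theorem repT_null (X : List Char) :
    repKW ['T','r','u','e'] ['t','r','u','e'] ('n'::'u'::'l'::'l'::X)
      = 'n'::'u'::'l'::'l':: repKW ['T','r','u','e'] ['t','r','u','e'] X := by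
  rw [repKW]; simp [List.isPrefixOf]
  rw [repKW]; simp [List.isPrefixOf]
  rw [repKW]; simp [List.isPrefixOf]
  rw [repKW]; simp [List.isPrefixOf]

theorem repT_false (X : List Char) :
    repKW ['T','r','u','e'] ['t','r','u','e'] ('f'::'a'::'l'::'s'::'e'::X)
      = 'f'::'a'::'l'::'s'::'e':: repKW ['T','r','u','e'] ['t','r','u','e'] X := by
  rw [repKW]; simp [List.isPrefixOf]
  rw [repKW]; simp [List.isPrefixOf]
  rw [repKW]; simp [List.isPrefixOf]
  rw [repKW]; simp [List.isPrefixOf]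
  rw [repKW]; simp [List.isPrefixOf]

theorem repN_false (X : List Char) :
    repKW ['N','o','n','e'] ['n','u','l','l'] ('F'::'a'::'l'::'s'::'e'::X)
      = 'F'::'a'::'l'::'s'::'e':: repKW ['N','o','n','e'] ['n','u','l','l'] X := by
  rw [repKW]; simp [List.isPrefixOf]
  rw [repKW]; simp [List.isPrefixOf]
  rw [repKW]; simp [List.isPrefixOf]
  rw [repKW]; simp [List.isPrefixOf]
  rw [repKW]; simp [List.isPrefixOf]

theorem repN_true (X : List Char) :
    repKW ['N','o','n','e'] ['n','u','l','l'] ('T'::'r'::'u'::'e'::X)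
      = 'T'::'r'::'u'::'e':: repKW ['N','o','n','e'] ['n','u','l','l'] X := by
  rw [repKW]; simp [List.isPrefixOf]
  rw [repKW]; simp [List.isPrefixOf]
  rw [repKW]; simp [List.isPrefixOf]
  rw [repKW]; simp [List.isPrefixOf]

theorem repF_true (X : List Char) :
    repKW ['F','a','l','s','e'] ['f','a','l','s','e'] ('T'::'r'::'u'::'e'::X)
      = 'T'::'r'::'u'::'e':: repKW ['F','a','l','s','e'] ['f','a','l','s','e'] X := by
  rw [repKW]; simp [List.isPrefixOf]
  rw [repKW]; simp [List.isPrefixOf]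
  rw [repKW]; simp [List.isPrefixOf]
  rw [repKW]; simp [List.isPrefixOf]

-- the heart of the equivalence: three sequential passes = one combined pass
theorem main_eq : ∀ l : List Char,
    repKW ['T','r','u','e'] ['t','r','u','e']
      (repKW ['F','a','l','s','e'] ['f','a','l','s','e']
        (repKW ['N','o','n','e'] ['n','u','l','l'] l)) = castGo l := by
  intro l
  induction l using castGo.induct with
  | case1 => rw [castGo]; rw [repKW]; rw [repKW]; rw [repKW]
  | case2 c t hN ih =>
      obtain ⟨r, hr⟩ := List.isPrefixOf_iff_prefix.mp hN
      obtain ⟨rfl, rfl⟩ : 'N' = c ∧ ['o','n','e'] ++ r = t := by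
        cases hr; simp_all
      rw [castGo]
      simp only [hN, if_true]
      have hdrop : List.drop 3 (['o','n','e'] ++ r) = r := by simp
      rw [hdrop]
      rw [hdrop] at ih
      show repKW _ _ (repKW _ _ (repKW _ _ ('N'::'o'::'n'::'e'::r))) = _
      rw [repN_match, repF_null, repT_null, ih]
      simp
  | case3 c t hN hF ih =>
      obtain ⟨r, hr⟩ := List.isPrefixOf_iff_prefix.mp hF
      obtain ⟨rfl, rfl⟩ : 'F' = c ∧ ['a','l','s','e'] ++ r = t := by
        cases hr; simp_all
      rw [castGo]
      simp only [hN, hF, if_true, Bool.false_eq_true, if_false]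
      have hdrop : List.drop 4 (['a','l','s','e'] ++ r) = r := by simp
      rw [hdrop]
      rw [hdrop] at ih
      show repKW _ _ (repKW _ _ (repKW _ _ ('F'::'a'::'l'::'s'::'e'::r))) = _
      rw [repN_false, repF_match, repT_false, ih]
      simp
  | case4 c t hN hF hT ih =>
      obtain ⟨r, hr⟩ := List.isPrefixOf_iff_prefix.mp hT
      obtain ⟨rfl, rfl⟩ : 'T' = c ∧ ['r','u','e'] ++ r = t := by
        cases hr; simp_all
      rw [castGo]
      simp only [hN, hF, hT, if_true, Bool.false_eq_true, if_false]
      have hdrop : List.drop 3 (['r','u','e'] ++ r) = r := by simp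
      rw [hdrop]
      rw [hdrop] at ih
      show repKW _ _ (repKW _ _ (repKW _ _ ('T'::'r'::'u'::'e'::r))) = _
      rw [repN_true, repF_true, repT_match, ih]
      simp
  | case5 c t hN hF hT ih =>
      rw [castGo]
      simp only [hN, hF, hT, Bool.false_eq_true, if_false]
      have h1 : repKW ['N','o','n','e'] ['n','u','l','l'] (c :: t)
          = c :: repKW ['N','o','n','e'] ['n','u','l','l'] t := by
        rw [repKW]; simp [hN]
      have hF2 : ¬ List.isPrefixOf ['F','a','l','s','e']
          (c :: repKW ['N','o','n','e'] ['n','u','l','l'] t) = true := by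
        intro h
        rw [← h1] at h
        exact hF (prefix_through_repKW _ _ 'n' rfl _ _ (by decide) h)
      have h2 : repKW ['F','a','l','s','e'] ['f','a','l','s','e']
            (c :: repKW ['N','o','n','e'] ['n','u','l','l'] t)
          = c :: repKW ['F','a','l','s','e'] ['f','a','l','s','e']
              (repKW ['N','o','n','e'] ['n','u','l','l'] t) := by
        rw [repKW]; simp [hF2]
      have hT2 : ¬ List.isPrefixOf ['T','r','u','e']
          (c :: repKW ['F','a','l','s','e'] ['f','a','l','s','e']
            (repKW ['N','o','n','e'] ['n','u','l','l'] t)) = true := by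
        intro h
        rw [← h2] at h
        have h' := prefix_through_repKW _ _ 'f' rfl _ _ (by decide) h
        rw [← h1] at h'
        exact hT (prefix_through_repKW _ _ 'n' rfl _ _ (by decide) h')
      have h3 : repKW ['T','r','u','e'] ['t','r','u','e']
            (c :: repKW ['F','a','l','s','e'] ['f','a','l','s','e']
              (repKW ['N','o','n','e'] ['n','u','l','l'] t))
          = c :: repKW ['T','r','u','e'] ['t','r','u','e']
              (repKW ['F','a','l','s','e'] ['f','a','l','s','e']
                (repKW ['N','o','n','e'] ['n','u','l','l'] t)) := by
        rw [repKW]; simp [hT2]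
      rw [h1, h2, h3, ih]

-- one guarded pass of A computes repKW on the character list
theorem guard_step (s old new : String) (hold : old.toList ≠ []) :
    (if PySem.Str.isIn old s then PySem.Str.replace s old new else s).toList
      = repKW old.toList new.toList s.toList := by
  by_cases h : PySem.Str.isIn old s = true
  · simp only [h, if_true]
    rw [PySem.Str.replace]
    simp only [String.toList_ofList]
    exact replace_eq_repKW _ _ _ hold
  · simp only [h, Bool.false_eq_true, if_false]
    have hninf : ¬ old.toList <:+: s.toList := by
      intro hinf
      simp only [Bool.not_eq_true] at h
      simp [pysem] at h
      exact h hinf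
    rw [repKW_of_not_infix _ _ _ hninf]

-- ===== VERDICT (by name: the statement is the Claim_ definition above) =====
theorem cast_keywords_spec : Claim_equal_cast_keywords := by
  intro val _
  unfold Spec_cast_keywords cast_keywords_alt
  have hlist : (cast_keywords val).toList = castGo val.toList := by
    unfold cast_keywords
    rw [guard_step _ "True" "true" (by decide),
        guard_step _ "False" "false" (by decide),
        guard_step _ "None" "null" (by decide)]
    exact main_eq val.toList
  rw [← hlist, String.ofList_toList]
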